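-- pv_equiv track=rewrite | github.com/Ankush1252/c4l | BDA2.py | reduce_step
-- ===== SOURCE A (Python) =====
-- def reduce_step(intermediate):
--     """Simplified Reduce step that computes the elements of matrix C."""
--     C = {}
--     # Aggregate values by key
--     for key, value in intermediate:
--         if key in C:
--             C[key].append(value)
--         else:
--             C[key] = [value]
--     # Compute each element of C
--     result_matrix = [[0 for _ in range(len(A))] for _ in range(len(A))]
--     for (matrix, i, j), values in C.items():
--         a_values = [v for k, v in values if k == "A"]
--         b_values = [v for k, v in values if k == "B"]
--         result_matrix[i][j] = sum(a*b for a, b in zip(a_values, b_values))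
--     return result_matrix
--
-- A = [[1, 2], [3, 4]]
-- ===== SOURCE B (Python) =====
-- def reduce_step(intermediate):
--     """Streaming reduce: per key, compute the A-B zip-sum online with a pending queue."""
--     state = {}  # key -> (running_sum, pending_a, pending_b)
--     for key, (k, v) in intermediate:
--         s, pa, pb = state.get(key, (0, [], []))
--         if k == "A":
--             if pb:
--                 s += v * pb[0]
--                 pb = pb[1:]
--             else:
--                 pa = pa + [v]
--         elif k == "B":
--             if pa:
--                 s += pa[0] * v
--                 pa = pa[1:]
--             else:
--                 pb = pb + [v]
--         state[key] = (s, pa, pb)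
--     n = len(A)
--     result_matrix = [[0] * n for _ in range(n)]
--     for (_m, i, j), (s, _pa, _pb) in state.items():
--         result_matrix[i][j] = s
--     return result_matrix
--
-- A = [[1, 2], [3, 4]]
-- ===== Notes on version B (the rewrite author's own statement) =====
-- stated objective: alternative
-- what changed: B never materializes per-key value lists: in the single pass it keeps per key a running sum and a pending queue of unmatched values, multiplying each A value with the earliest unmatched B value (and vice versa) the moment it arrives, so the collect/filter/zip stage of A disappears and the grid is filled from the finished sums.
import Mathlib
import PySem

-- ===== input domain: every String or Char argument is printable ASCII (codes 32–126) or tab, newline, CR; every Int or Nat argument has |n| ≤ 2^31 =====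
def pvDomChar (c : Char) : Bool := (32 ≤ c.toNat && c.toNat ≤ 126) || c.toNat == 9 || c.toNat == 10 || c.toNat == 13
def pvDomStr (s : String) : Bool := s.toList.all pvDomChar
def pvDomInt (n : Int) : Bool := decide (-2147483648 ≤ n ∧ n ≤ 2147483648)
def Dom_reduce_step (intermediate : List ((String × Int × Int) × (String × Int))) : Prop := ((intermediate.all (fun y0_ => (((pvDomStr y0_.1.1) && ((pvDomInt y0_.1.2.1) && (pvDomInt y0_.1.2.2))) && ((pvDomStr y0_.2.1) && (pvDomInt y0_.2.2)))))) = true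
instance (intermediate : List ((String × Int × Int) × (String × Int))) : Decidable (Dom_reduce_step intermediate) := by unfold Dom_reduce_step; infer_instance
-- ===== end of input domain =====

-- B computes each key's A·B zip-sum ONLINE in the single pass (running sum + pending queue of
-- unmatched values) instead of collecting all values per key and filter/zip-ing afterwards;
-- same return value, no speed claim.

-- module-level constant A = [[1, 2], [3, 4]]
def pyA : List (List Int) := [[1, 2], [3, 4]]

-- result_matrix[i][j] = s  (row lookup then in-place cell write; total forms, exact under Pre_)
def pySetCell (m : List (List Int)) (i j s : Int) : List (List Int) :=
  PySem.List.pySetD m i (PySem.List.pySetD (PySem.List.pyGetD m i []) j s)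

-- ===== PORT A =====
def reduce_step (intermediate : List ((String × Int × Int) × (String × Int))) : List (List Int) :=
  let C := intermediate.foldl (fun d kv =>
      if d.contains kv.1 then d.insert kv.1 (d.getD kv.1 [] ++ [kv.2])
      else d.insert kv.1 [kv.2]) PySem.Dict.empty
  let result0 := (List.range pyA.length).map (fun _ => (List.range pyA.length).map (fun _ => (0 : Int)))
  C.items.foldl (fun m kv =>
      let a_values := (kv.2.filter (fun p => p.1 == "A")).map (·.2)
      let b_values := (kv.2.filter (fun p => p.1 == "B")).map (·.2)
      pySetCell m kv.1.2.1 kv.1.2.2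
        ((a_values.zip b_values).foldl (fun s ab => s + ab.1 * ab.2) 0)) result0

-- ===== PORT B =====
-- one step of B's loop body: the if/elif on k over the state (s, pa, pb).
-- Python's 'if pb:' / 'pb[0]' / 'pb[1:]' on a list is exactly the match on cons.
def updS (st : Int × List Int × List Int) (kv : String × Int) : Int × List Int × List Int :=
  if kv.1 == "A" then
    match st.2.2 with
    | x :: rest => (st.1 + kv.2 * x, st.2.1, rest)
    | [] => (st.1, st.2.1 ++ [kv.2], st.2.2)
  else if kv.1 == "B" then
    match st.2.1 with
    | x :: rest => (st.1 + x * kv.2, rest, st.2.2)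
    | [] => (st.1, st.2.1, st.2.2 ++ [kv.2])
  else st

def reduce_step_alt (intermediate : List ((String × Int × Int) × (String × Int))) : List (List Int) :=
  let state := intermediate.foldl (fun d kv =>
      d.insert kv.1 (updS (d.getD kv.1 (0, [], [])) kv.2)) PySem.Dict.empty
  let n := pyA.length
  let result0 := (List.range n).map (fun _ => List.replicate n (0 : Int))
  state.items.foldl (fun m kv =>
      pySetCell m kv.1.2.1 kv.1.2.2 kv.2.1) result0

-- ===== PRECONDITION & SPEC =====
-- Pre_ excludes exactly the inputs on which Python A raises IndexError: a key whose i or j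
-- is not a valid index into the 2×2 result matrix (len(A) = 2).
def Pre_reduce_step (intermediate : List ((String × Int × Int) × (String × Int))) : Prop :=
  ∀ p ∈ intermediate, PySem.Raise.InRange 2 p.1.2.1 ∧ PySem.Raise.InRange 2 p.1.2.2
instance (intermediate : List ((String × Int × Int) × (String × Int))) : Decidable (Pre_reduce_step intermediate) := by unfold Pre_reduce_step; infer_instance

def pvWitness_reduce_step : (List ((String × Int × Int) × (String × Int))) :=
  [(("C", 0, 1), ("A", 3)), (("C", 0, 1), ("B", 4)), (("C", -1, -2), ("A", 7))]

def Spec_reduce_step (intermediate : List ((String × Int × Int) × (String × Int))) (out : List (List Int)) : Prop := out = reduce_step_alt intermediate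
instance (intermediate : List ((String × Int × Int) × (String × Int))) (out : List (List Int)) : Decidable (Spec_reduce_step intermediate out) := by unfold Spec_reduce_step; infer_instance

-- ===== CLAIM (what is proved, stated in full; the proofs are below) =====
def Claim_equal_reduce_step : Prop := ∀ (intermediate : List ((String × Int × Int) × (String × Int))), Dom_reduce_step intermediate → Pre_reduce_step intermediate → Spec_reduce_step intermediate (reduce_step intermediate)

-- ===== LEMMAS AND PROOFS =====

-- the sum of pairwise products of the common prefix of two lists
def zipsum : List Int → List Int → Int
  | x :: xs, y :: ys => x * y + zipsum xs ys
  | _, _ => 0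

theorem foldl_zip_eq_zipsum (a : List Int) : ∀ (b : List Int) (s : Int),
    (a.zip b).foldl (fun s ab => s + ab.1 * ab.2) s = s + zipsum a b := by
  induction a with
  | nil => intro b s; simp [zipsum]
  | cons x xs ih =>
    intro b s
    cases b with
    | nil => simp [zipsum]
    | cons y ys => simp [zipsum, ih]; ring

theorem zipsum_comm (a : List Int) : ∀ b : List Int, zipsum a b = zipsum b a := by
  induction a with
  | nil => intro b; cases b <;> simp [zipsum]
  | cons x xs ih => intro b; cases b <;> simp [zipsum, ih]; ring

theorem zipsum_append_lt (v x : Int) (a : List Int) : ∀ (b rest : List Int),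
    b.drop a.length = x :: rest → zipsum (a ++ [v]) b = zipsum a b + v * x := by
  induction a with
  | nil =>
    intro b rest h; simp at h; subst h; simp [zipsum]
  | cons h t ih =>
    intro b rest hd
    cases b with
    | nil => simp at hd
    | cons y ys =>
      simp only [List.length_cons, List.drop_succ_cons] at hd
      simp [zipsum, ih ys rest hd]; ring

theorem zipsum_append_ge (a : List Int) : ∀ (b l : List Int),
    b.length ≤ a.length → zipsum (a ++ l) b = zipsum a b := by
  induction a with
  | nil =>
    intro b l h
    have : b = [] := List.eq_nil_of_length_eq_zero (Nat.le_zero.mp h)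
    subst this; cases l <;> simp [zipsum]
  | cons x xs ih =>
    intro b l h
    cases b with
    | nil => simp [zipsum]
    | cons y ys =>
      simp only [List.length_cons, Nat.add_le_add_iff_right] at h
      simp [zipsum, ih ys l h]

-- the per-key abstraction: B's online state computed from A's grouped value list
def gS (vs : List (String × Int)) : Int × List Int × List Int :=
  let a := (vs.filter (fun p => p.1 == "A")).map (·.2)
  let b := (vs.filter (fun p => p.1 == "B")).map (·.2)
  (zipsum a b, a.drop b.length, b.drop a.length)

theorem updS_gS (vs : List (String × Int)) (kv : String × Int) :
    updS (gS vs) kv = gS (vs ++ [kv]) := by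
  simp only [gS, updS, List.filter_append, List.map_append]
  by_cases hA : kv.1 == "A"
  · have hB : ¬ (kv.1 == "B") := by simp_all [eq_of_beq hA]
    simp only [hA, if_true]
    set a := (vs.filter (fun p => p.1 == "A")).map (·.2) with ha
    set b := (vs.filter (fun p => p.1 == "B")).map (·.2) with hb
    have hfa : ([kv].filter (fun p => p.1 == "A")).map (Prod.snd) = [kv.2] := by
      simp [List.filter, hA]
    have hfb : ([kv].filter (fun p => p.1 == "B")).map (Prod.snd) = [] := by
      simp [List.filter, hB]
    rw [hfa, hfb, List.append_nil]
    cases hd : b.drop a.length with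
    | nil =>
      have hle : b.length ≤ a.length := by
        by_contra hlt
        have : a.length < b.length := Nat.lt_of_not_le hlt
        have := List.drop_eq_nil_iff.mp hd
        omega
      simp only []
      refine Prod.ext ?_ (Prod.ext ?_ ?_)
      · exact (zipsum_append_ge a b [kv.2] hle).symm
      · simp [List.drop_append_of_le_length hle]
      · simp only [List.length_append, List.length_cons, List.length_nil]
        have : b.drop (a.length + 1) = [] :=
          List.drop_eq_nil_iff.mpr (by omega)
        simp [this]
    | cons x rest =>
      have hlt : a.length < b.length := by
        by_contra hge
        have : b.drop a.length = [] := List.drop_eq_nil_iff.mpr (by omega)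
        simp [this] at hd
      simp only []
      refine Prod.ext ?_ (Prod.ext ?_ ?_)
      · exact (zipsum_append_lt kv.2 x a b rest hd).symm
      · have h1 : a.drop b.length = [] := List.drop_eq_nil_iff.mpr (by omega)
        have h2 : (a ++ [kv.2]).drop b.length = [] :=
          List.drop_eq_nil_iff.mpr (by simp; omega)
        simp [h1, h2]
      · simp only [List.length_append, List.length_cons, List.length_nil]
        have : b.drop (a.length + 1) = (b.drop a.length).drop 1 := by
          simp [List.drop_drop]
        rw [this, hd]; rfl
  · by_cases hB : kv.1 == "B"
    · have hA' : (kv.1 == "A") = false := by simpa using hA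
      simp only [hA', hB, Bool.false_eq_true, if_false, if_true]
      set a := (vs.filter (fun p => p.1 == "A")).map (·.2) with ha
      set b := (vs.filter (fun p => p.1 == "B")).map (·.2) with hb
      have hfa : ([kv].filter (fun p => p.1 == "A")).map (Prod.snd) = [] := by
        simp [List.filter, hA]
      have hfb : ([kv].filter (fun p => p.1 == "B")).map (Prod.snd) = [kv.2] := by
        simp [List.filter, hB]
      rw [hfa, hfb, List.append_nil]
      cases hd : a.drop b.length with
      | nil =>
        have hle : a.length ≤ b.length := by
          by_contra hlt
          have := List.drop_eq_nil_iff.mp hd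
          omega
        simp only []
        refine Prod.ext ?_ (Prod.ext ?_ ?_)
        · rw [zipsum_comm a (b ++ [kv.2]), zipsum_append_ge b a [kv.2] hle,
              zipsum_comm b a]
        · simp only [List.length_append, List.length_cons, List.length_nil]
          have : a.drop (b.length + 1) = [] := List.drop_eq_nil_iff.mpr (by omega)
          simp [this]
        · simp [List.drop_append_of_le_length hle]
      | cons x rest =>
        have hlt : b.length < a.length := by
          by_contra hge
          have : a.drop b.length = [] := List.drop_eq_nil_iff.mpr (by omega)
          simp [this] at hd
        simp only []
        refine Prod.ext ?_ (Prod.ext ?_ ?_)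
        · rw [zipsum_comm a (b ++ [kv.2]), zipsum_append_lt kv.2 x b a rest hd,
              zipsum_comm b a]; ring
        · simp only [List.length_append, List.length_cons, List.length_nil]
          have : a.drop (b.length + 1) = (a.drop b.length).drop 1 := by
            simp [List.drop_drop]
          rw [this, hd]; rfl
        · have h1 : b.drop a.length = [] := List.drop_eq_nil_iff.mpr (by omega)
          have h2 : (b ++ [kv.2]).drop a.length = [] :=
            List.drop_eq_nil_iff.mpr (by simp; omega)
          simp [h1, h2]
    · simp [hA, hB]

theorem dict_inv (l : List ((String × Int × Int) × (String × Int)))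
    (dA : PySem.Dict (String × Int × Int) (List (String × Int)))
    (dB : PySem.Dict (String × Int × Int) (Int × List Int × List Int))
    (hn : dA.keys.Nodup)
    (h : dB.items = dA.items.map (fun p => (p.1, gS p.2))) :
    (l.foldl (fun d kv => d.insert kv.1 (updS (d.getD kv.1 (0, [], [])) kv.2)) dB).items =
      (l.foldl (fun d kv =>
        if d.contains kv.1 then d.insert kv.1 (d.getD kv.1 [] ++ [kv.2])
        else d.insert kv.1 [kv.2]) dA).items.map (fun p => (p.1, gS p.2)) := by
  induction l generalizing dA dB with
  | nil => simpa using h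
  | cons p l ih =>
    have hkeys : dB.keys = dA.keys := by
      simp only [PySem.Dict.keys, h, List.map_map]; rfl
    have hnB : dB.keys.Nodup := by rw [hkeys]; exact hn
    have hcont : dB.contains p.1 = dA.contains p.1 := by
      rw [PySem.Dict.contains_eq_decide_mem_keys, PySem.Dict.contains_eq_decide_mem_keys, hkeys]
    simp only [List.foldl_cons]
    by_cases hc : dA.contains p.1 = true
    · obtain ⟨vs, hvs⟩ : ∃ vs, dA.get? p.1 = some vs := by
        cases hget : dA.get? p.1 with
        | none => rw [PySem.Dict.get?_eq_none_iff_contains] at hget; simp [hget] at hc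
        | some vs => exact ⟨vs, rfl⟩
      have hAget : dA.getD p.1 [] = vs := PySem.Dict.getD_of_get?_eq_some _ _ hvs
      have hmemA : (p.1, vs) ∈ dA.items := PySem.Dict.mem_items_of_get?_eq_some _ hvs
      have hmemB : (p.1, gS vs) ∈ dB.items := by
        rw [h]; exact List.mem_map.mpr ⟨(p.1, vs), hmemA, rfl⟩
      have hBget : dB.getD p.1 (0, [], []) = gS vs :=
        PySem.Dict.getD_of_mem_items _ hmemB hnB _
      rw [hc, if_pos rfl]
      refine ih _ _ (PySem.Dict.nodup_keys_insert _ _ _ hn) ?_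
      rw [PySem.Dict.items_insert_of_contains _ _ (by rw [hcont]; exact hc),
          PySem.Dict.items_insert_of_contains _ _ hc, h, List.map_map, List.map_map]
      refine List.map_congr_left (fun q _ => ?_)
      by_cases hq : q.1 == p.1
      · simp [eq_of_beq hq, hBget, hAget, updS_gS]
      · have hq' : q.1 ≠ p.1 := by simpa using hq
        simp [hq']
    · have hc' : dA.contains p.1 = false := by simpa using hc
      have hcB : dB.contains p.1 = false := by rw [hcont]; exact hc'
      have hBget : dB.getD p.1 (0, [], []) = (0, [], []) :=
        PySem.Dict.getD_of_not_contains _ _ hcB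
      rw [hc', if_neg (by simp)]
      refine ih _ _ (PySem.Dict.nodup_keys_insert _ _ _ hn) ?_
      rw [PySem.Dict.items_insert_of_not_contains _ _ hcB,
          PySem.Dict.items_insert_of_not_contains _ _ hc', h, List.map_append]
      have : updS (0, [], []) p.2 = gS [p.2] := by simpa using updS_gS [] p.2
      simp [hBget, this]

-- ===== VERDICT (by name: the statement is the Claim_ definition above) =====
theorem reduce_step_spec : Claim_equal_reduce_step := by
  intro l _ _
  show reduce_step l = reduce_step_alt l
  unfold reduce_step reduce_step_alt
  have hitems := dict_inv l PySem.Dict.empty PySem.Dict.empty (by decide) (by rfl)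
  simp only [hitems, List.foldl_map]
  have hfun : (fun (m : List (List Int)) (kv : (String × Int × Int) × List (String × Int)) =>
      pySetCell m kv.1.2.1 kv.1.2.2
        (((((kv.2.filter (fun p => p.1 == "A")).map (·.2)).zip
            ((kv.2.filter (fun p => p.1 == "B")).map (·.2))).foldl
          (fun s ab => s + ab.1 * ab.2) 0)))
      = (fun m kv => pySetCell m kv.1.2.1 kv.1.2.2 (gS kv.2).1) := by
    funext m kv
    simp only [gS, foldl_zip_eq_zipsum, Int.zero_add]
  rw [hfun]
  rfl
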